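-- pv_equiv track=rewrite | github.com/worldvisualizer/stuck-with-codes | algorithms/bearrobotics/string_to_num.py | encodeNumberToString
-- ===== SOURCE A (Python) =====
-- DIGITSTRING = {
--     0: "zero",
--     1: "one",
--     2: "two",
--     3: "three",
--     4: "four",
--     5: "five",
--     6: "six",
--     7: "seven",
--     8: "eight",
--     9: "nine",
-- }
--
-- def encodeNumberToString(wholeInt):
--     """
--     encode whole number into string
--     consider negative number as well
--
--     wholeInt: (int) whole number
--
--     returns: (str) string representation of a wholeInt
--     """
--     if wholeInt == 0:
--         return "zero"
--     string = "" if abs(wholeInt) == wholeInt else "negative"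
--     wholeInt = abs(wholeInt)
--     digitlist = []
--
--     while wholeInt:
--         digitlist.append(wholeInt % 10)
--         wholeInt //= 10
--     digitlist.reverse()
--     string += "".join([DIGITSTRING.get(i, "") for i in digitlist])
--     return string
-- ===== SOURCE B (Python) =====
-- DIGITWORDS = {
--     "0": "zero", "1": "one", "2": "two", "3": "three", "4": "four",
--     "5": "five", "6": "six", "7": "seven", "8": "eight", "9": "nine",
-- }
--
-- def encodeNumberToString(wholeInt):
--     if wholeInt == 0:
--         return "zero"
--     prefix = "negative" if wholeInt < 0 else ""
--     return prefix + "".join(DIGITWORDS[ch] for ch in str(abs(wholeInt)))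
-- ===== Notes on version B (the rewrite author's own statement) =====
-- stated objective: idiomatic
-- what changed: B drops A's modulo/floor-division digit-extraction loop with list reversal and instead maps each character of str(abs(wholeInt)) to its word in one forward join.
import Mathlib
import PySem

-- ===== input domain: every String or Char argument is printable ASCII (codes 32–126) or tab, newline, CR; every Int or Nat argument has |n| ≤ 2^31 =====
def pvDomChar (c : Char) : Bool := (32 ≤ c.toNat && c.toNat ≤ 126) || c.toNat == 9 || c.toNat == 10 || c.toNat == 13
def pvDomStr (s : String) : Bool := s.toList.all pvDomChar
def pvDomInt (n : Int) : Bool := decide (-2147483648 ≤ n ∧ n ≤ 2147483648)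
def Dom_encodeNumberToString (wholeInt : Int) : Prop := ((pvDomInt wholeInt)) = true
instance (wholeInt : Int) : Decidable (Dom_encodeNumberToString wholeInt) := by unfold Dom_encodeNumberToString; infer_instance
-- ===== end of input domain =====

-- B replaces A's modulo/floor-division digit-extraction loop (plus list reversal) by one
-- forward pass over the decimal string of |wholeInt| (idiomatic; same asymptotic cost).

-- ===== PORT A =====
def DIGITSTRING : PySem.Dict Int String := PySem.Dict.ofList
  [(0, "zero"), (1, "one"), (2, "two"), (3, "three"), (4, "four"),
   (5, "five"), (6, "six"), (7, "seven"), (8, "eight"), (9, "nine")]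

-- the 'while wholeInt:' digit-extraction loop of A (wholeInt is nonnegative there)
def pvLoopA (n : Nat) (acc : List Int) : List Int :=
  if _h : n = 0 then acc
  else pvLoopA (n / 10) (acc ++ [((n % 10 : Nat) : Int)])
decreasing_by exact Nat.div_lt_self (by omega) (by omega)

def encodeNumberToString (wholeInt : Int) : String :=
  if wholeInt = 0 then "zero"
  else
    let string : List Char := if |wholeInt| = wholeInt then [] else "negative".toList
    let digitlist : List Int := (pvLoopA wholeInt.natAbs []).reverse
    String.ofList (string ++
      (digitlist.map (fun i => (PySem.Dict.getD DIGITSTRING i "").toList)).flatten)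

-- ===== PORT B =====
def DIGITWORDS : PySem.Dict Char String := PySem.Dict.ofList
  [('0', "zero"), ('1', "one"), ('2', "two"), ('3', "three"), ('4', "four"),
   ('5', "five"), ('6', "six"), ('7', "seven"), ('8', "eight"), ('9', "nine")]

-- DIGITWORDS[ch]: every ch of str(abs(wholeInt)) is a decimal digit, so the KeyError
-- branch of Python's lookup is unreachable; getD with "" is exact here.
def encodeNumberToString_alt (wholeInt : Int) : String :=
  if wholeInt = 0 then "zero"
  else
    let pre : List Char := if wholeInt < 0 then "negative".toList else []
    String.ofList (pre ++
      (PySem.Int.toChars |wholeInt|).flatMap (fun ch => (PySem.Dict.getD DIGITWORDS ch "").toList))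

-- ===== PRECONDITION & SPEC =====
def Spec_encodeNumberToString (wholeInt : Int) (out : String) : Prop := out = encodeNumberToString_alt wholeInt
instance (wholeInt : Int) (out : String) : Decidable (Spec_encodeNumberToString wholeInt out) := by unfold Spec_encodeNumberToString; infer_instance

-- ===== CLAIM (what is proved, stated in full; the proofs are below) =====
def Claim_equal_encodeNumberToString : Prop := ∀ (wholeInt : Int), Dom_encodeNumberToString wholeInt → Spec_encodeNumberToString wholeInt (encodeNumberToString wholeInt)

-- ===== LEMMAS AND PROOFS =====

-- little-endian decimal digits of n (empty for 0)
def pvDigitsLE (n : Nat) : List Nat :=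
  if _h : n = 0 then [] else n % 10 :: pvDigitsLE (n / 10)
decreasing_by exact Nat.div_lt_self (by omega) (by omega)

-- little-endian digits as Nat.toDigitsCore emits them (always at least one digit)
def pvRep (n : Nat) : List Nat :=
  n % 10 :: (if h : n / 10 = 0 then [] else pvRep (n / 10))
decreasing_by exact Nat.div_lt_self (by omega) (by omega)

theorem pvLoopA_eq (n : Nat) : ∀ (acc : List Int),
    pvLoopA n acc = acc ++ (pvDigitsLE n).map (fun d => Int.ofNat d) := by
  induction n using Nat.strong_induction_on with
  | _ n ih =>
    intro acc
    rw [pvLoopA, pvDigitsLE]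
    by_cases h : n = 0
    · simp [h]
    · simp only [h, dif_neg, not_false_iff]
      rw [ih (n / 10) (Nat.div_lt_self (by omega) (by omega))]
      simp

theorem pvToDigitsCore_eq (fuel : Nat) : ∀ (n : Nat) (acc : List Char), n < fuel →
    Nat.toDigitsCore 10 fuel n acc = (pvRep n).reverse.map Nat.digitChar ++ acc := by
  induction fuel with
  | zero => intro n acc h; omega
  | succ f ih =>
    intro n acc h
    rw [Nat.toDigitsCore, pvRep]
    by_cases h10 : n / 10 = 0
    · simp [h10]
    · have hlt : n / 10 < f := by omega
      simp only [h10, if_neg, dif_neg, not_false_iff]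
      rw [ih (n / 10) _ hlt]
      simp

theorem pvToDigits_eq (n : Nat) :
    Nat.toDigits 10 n = (pvRep n).reverse.map Nat.digitChar := by
  have := pvToDigitsCore_eq (n + 1) n [] (by omega)
  simpa [Nat.toDigits] using this

theorem pvRep_eq (n : Nat) (h : n ≠ 0) : pvRep n = pvDigitsLE n := by
  induction n using Nat.strong_induction_on with
  | _ n ih =>
    rw [pvRep, pvDigitsLE]
    simp only [h, dif_neg, not_false_iff]
    by_cases h0 : n / 10 = 0
    · simp [h0, pvDigitsLE]
    · simp only [h0, dif_neg, not_false_iff]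
      rw [ih (n / 10) (Nat.div_lt_self (by omega) (by omega)) h0]

theorem pvDigitsLE_lt (n : Nat) : ∀ d ∈ pvDigitsLE n, d < 10 := by
  induction n using Nat.strong_induction_on with
  | _ n ih =>
    rw [pvDigitsLE]
    by_cases h : n = 0
    · simp [h]
    · simp only [h, dif_neg, not_false_iff, List.mem_cons]
      rintro d (rfl | hd)
      · omega
      · exact ih (n / 10) (Nat.div_lt_self (by omega) (by omega)) d hd

theorem pvWord_eq (d : Nat) (h : d < 10) :
    (PySem.Dict.getD DIGITSTRING (Int.ofNat d) "").toList
      = (PySem.Dict.getD DIGITWORDS (Nat.digitChar d) "").toList := by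
  interval_cases d <;> decide

theorem pvFlat_eq (l : List Nat) (h : ∀ d ∈ l, d < 10) :
    ((l.map (fun d => Int.ofNat d)).map (fun i => (PySem.Dict.getD DIGITSTRING i "").toList)).flatten
      = (l.map Nat.digitChar).flatMap (fun ch => (PySem.Dict.getD DIGITWORDS ch "").toList) := by
  induction l with
  | nil => simp
  | cons a t ih =>
    simp only [List.map_cons, List.flatten_cons, List.flatMap_cons]
    rw [ih (fun d hd => h d (List.mem_cons_of_mem a hd)),
        pvWord_eq a (h a List.mem_cons_self)]

theorem encodeNumberToString_eq (wholeInt : Int) :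
    encodeNumberToString wholeInt = encodeNumberToString_alt wholeInt := by
  unfold encodeNumberToString encodeNumberToString_alt
  by_cases h0 : wholeInt = 0
  · simp [h0]
  · simp only [h0, if_neg, not_false_iff]
    have hm : wholeInt.natAbs ≠ 0 := by simpa using h0
    have hsign : (if |wholeInt| = wholeInt then ([] : List Char) else "negative".toList)
        = (if wholeInt < 0 then "negative".toList else []) := by
      by_cases hn : wholeInt < 0
      · rw [if_pos hn, if_neg (by rw [abs_of_neg hn]; omega)]
      · rw [if_neg hn, if_pos (abs_of_nonneg (by omega))]
    have hchars : PySem.Int.toChars |wholeInt| = Nat.toDigits 10 wholeInt.natAbs := by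
      rw [PySem.Int.toChars, if_neg (by have := abs_nonneg wholeInt; omega),
          Int.abs_eq_natAbs, Int.toNat_natCast]
    rw [hsign, hchars, pvToDigits_eq, pvRep_eq _ hm, pvLoopA_eq, List.nil_append,
        (List.map_reverse).symm]
    congr 2
    exact pvFlat_eq _ (fun d hd => pvDigitsLE_lt _ d (List.mem_reverse.mp hd))

-- ===== VERDICT (by name: the statement is the Claim_ definition above) =====
theorem encodeNumberToString_spec : Claim_equal_encodeNumberToString := by
  intro wholeInt _
  exact encodeNumberToString_eq wholeInt
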